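-- pv_equiv track=rewrite | github.com/RodriFinalis/Eva-EL | utils/pdf.py | crear_chunks
-- ===== SOURCE A (Python) =====
-- def crear_chunks(texto, max_tokens=32000):
--     words = texto.split()
--     chunks, current_chunk = [], []
--     current_length = 0
--     for word in words:
--         current_chunk.append(word)
--         current_length += len(word) + 1
--         if current_length >= max_tokens:
--             chunks.append(" ".join(current_chunk))
--             current_chunk, current_length = [], 0
--     if current_chunk:
--         chunks.append(" ".join(current_chunk))
--     return chunks
-- ===== SOURCE B (Python) =====
-- def crear_chunks(texto, max_tokens=32000):
--     words = texto.split()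
--     cuts = []
--     run = 0
--     for i, w in enumerate(words):
--         run += len(w) + 1
--         if run >= max_tokens:
--             cuts.append(i + 1)
--             run = 0
--     last = cuts[-1] if cuts else 0
--     if last != len(words):
--         cuts.append(len(words))
--     chunks = []
--     prev = 0
--     for c in cuts:
--         chunks.append(" ".join(words[prev:c]))
--         prev = c
--     return chunks
-- ===== Notes on version B (the rewrite author's own statement) =====
-- stated objective: alternative
-- what changed: B replaces A's single pass that assembles chunk strings inline with a two-pass scheme: a first pass records only cut indices (running length reset at each cut), a second pass slices the word list at consecutive cut points and joins each slice.
import Mathlib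
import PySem

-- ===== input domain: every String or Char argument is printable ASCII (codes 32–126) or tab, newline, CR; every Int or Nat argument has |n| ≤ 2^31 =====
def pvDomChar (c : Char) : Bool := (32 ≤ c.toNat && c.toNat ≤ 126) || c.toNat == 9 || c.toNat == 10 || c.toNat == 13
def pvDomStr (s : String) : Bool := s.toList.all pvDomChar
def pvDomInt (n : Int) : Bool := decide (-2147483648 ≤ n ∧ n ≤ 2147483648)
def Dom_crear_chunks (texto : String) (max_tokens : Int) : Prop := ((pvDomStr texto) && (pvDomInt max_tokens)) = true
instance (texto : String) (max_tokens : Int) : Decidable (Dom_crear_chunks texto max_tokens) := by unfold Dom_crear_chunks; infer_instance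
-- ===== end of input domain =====

-- B records cut indices in a first pass and joins slices in a second pass, instead of
-- assembling chunk strings inline as A does; same O(n) cost, different decomposition.

-- ===== PORT A =====
-- the for-loop of A: state (chunks, current_chunk, current_length)
def pvALoop (mt : Int) : List String → List String → List String → Int → (List String × List String)
  | [], chunks, cur, _ => (chunks, cur)
  | w :: ws, chunks, cur, len =>
    let cur' := cur ++ [w]
    let len' := len + PySem.Str.len w + 1
    if len' ≥ mt then pvALoop mt ws (chunks ++ [PySem.Str.join " " cur']) [] 0
    else pvALoop mt ws chunks cur' len'

def crear_chunks (texto : String) (max_tokens : Int) : List String :=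
  let words := PySem.Str.split₀ texto
  let r := pvALoop max_tokens words [] [] 0
  if r.2.isEmpty then r.1 else r.1 ++ [PySem.Str.join " " r.2]

-- ===== PORT B =====
-- first pass of B: for i, w in enumerate(words): run += len(w)+1; if run >= mt: append i+1, reset
def pvBCuts (mt : Int) : List String → Int → Int → List Int
  | [], _, _ => []
  | w :: ws, i, run =>
    let run' := run + PySem.Str.len w + 1
    if run' ≥ mt then (i + 1) :: pvBCuts mt ws (i + 1) 0
    else pvBCuts mt ws (i + 1) run'

-- second pass of B: prev = 0; for c in cuts: append " ".join(words[prev:c]); prev = c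
def pvBJoin (words : List String) : Int → List Int → List String
  | _, [] => []
  | prev, c :: cs =>
    PySem.Str.join " " (PySem.List.slice words (some prev) (some c)) :: pvBJoin words c cs

def crear_chunks_alt (texto : String) (max_tokens : Int) : List String :=
  let words := PySem.Str.split₀ texto
  let cuts := pvBCuts max_tokens words 0 0
  let last := match cuts.getLast? with | some x => x | none => 0
  let cuts := if last ≠ (words.length : Int) then cuts ++ [(words.length : Int)] else cuts
  pvBJoin words 0 cuts

-- ===== PRECONDITION & SPEC =====
def Spec_crear_chunks (texto : String) (max_tokens : Int) (out : List String) : Prop := out = crear_chunks_alt texto max_tokens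
instance (texto : String) (max_tokens : Int) (out : List String) : Decidable (Spec_crear_chunks texto max_tokens out) := by unfold Spec_crear_chunks; infer_instance

-- ===== CLAIM (what is proved, stated in full; the proofs are below) =====
def Claim_equal_crear_chunks : Prop := ∀ (texto : String) (max_tokens : Int), Dom_crear_chunks texto max_tokens → Spec_crear_chunks texto max_tokens (crear_chunks texto max_tokens)

-- ===== LEMMAS AND PROOFS =====

-- B's padding decision on the suffix of cuts after position j (j = last cut so far, default 0)
def pvPad (words : List String) (j : Nat) (cs : List Int) : List Int :=
  if (cs.getLast?.getD (j : Int)) ≠ (words.length : Int) then cs ++ [(words.length : Int)] else cs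

theorem pvMain (mt : Int) (words : List String) :
    ∀ (ws : List String) (i j : Nat) (run : Int) (chunks cur : List String),
      ws = words.drop i → j ≤ i → i ≤ words.length →
      cur = (words.drop j).take (i - j) →
      (let r := pvALoop mt ws chunks cur run;
        if r.2.isEmpty then r.1 else r.1 ++ [PySem.Str.join " " r.2])
      = chunks ++ pvBJoin words (j : Int) (pvPad words j (pvBCuts mt ws (i : Int) run)) := by
  intro ws
  induction ws with
  | nil =>
    intro i j run chunks cur hws hji hil hcur
    have hi : i = words.length := by
      have := congrArg List.length hws
      simp [List.length_drop] at this
      omega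
    subst hi
    simp only [pvALoop, pvBCuts, pvPad, List.getLast?_nil, Option.getD_none]
    by_cases hj : j = words.length
    · subst hj
      simp [hcur, List.drop_length, pvBJoin]
    · have hjlt : j < words.length := lt_of_le_of_ne hji hj
      have hne : ((j : Int) ≠ (words.length : Int)) := by exact_mod_cast hj
      have hcur' : cur = words.drop j := by
        rw [hcur, List.take_of_length_le] ; simp [List.length_drop]
      have hne2 : cur ≠ [] := by
        rw [hcur']
        intro h
        have := congrArg List.length h
        simp [List.length_drop] at this
        omega
      simp only [if_pos hne, List.nil_append]
      rw [show pvBJoin words (j : Int) [(words.length : Int)]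
            = [PySem.Str.join " " (PySem.List.slice words (some (j : Int)) (some (words.length : Int)))] from rfl]
      rw [PySem.List.slice_natCast,
        List.take_of_length_le (le_of_eq (by simp [List.length_drop])), ← hcur']
      simp [List.isEmpty_iff, hne2]
  | cons w ws ih =>
    intro i j run chunks cur hws hji hil hcur
    have hilt : i < words.length := by
      by_contra h
      rw [List.drop_eq_nil_of_le (by omega)] at hws
      exact List.cons_ne_nil _ _ hws
    have hdrop : words.drop i = words[i] :: words.drop (i + 1) :=
      List.drop_eq_getElem_cons hilt
    rw [hdrop] at hws
    obtain ⟨hw, hws'⟩ := List.cons.inj hws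
    have hcur' : cur ++ [w] = (words.drop j).take (i + 1 - j) := by
      have h1 : i + 1 - j = (i - j) + 1 := by omega
      rw [h1, List.take_add_one, hcur]
      congr 1
      rw [List.getElem?_drop, (by omega : j + (i - j) = i),
        List.getElem?_eq_getElem hilt]
      simp [hw]
    simp only [pvALoop, pvBCuts]
    by_cases hge : run + PySem.Str.len w + 1 ≥ mt
    · simp only [if_pos hge]
      rw [ih (i + 1) (i + 1) 0 (chunks ++ [PySem.Str.join " " (cur ++ [w])]) []
            hws' (le_refl _) (by omega) (by simp)]
      have hpad : pvPad words j (((i : Int) + 1) :: pvBCuts mt ws ((i : Int) + 1) 0)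
          = ((i : Int) + 1) :: pvPad words (i + 1) (pvBCuts mt ws ((i : Int) + 1) 0) := by
        unfold pvPad
        cases pvBCuts mt ws ((i : Int) + 1) 0 with
        | nil =>
          simp only [List.getLast?_singleton, List.getLast?_nil, Option.getD_some,
            Option.getD_none, List.nil_append]
          push_cast
          split_ifs <;> simp
        | cons c cs =>
          obtain ⟨x, hx⟩ := Option.isSome_iff_exists.mp
            (List.getLast?_isSome.mpr (List.cons_ne_nil c cs))
          simp only [List.getLast?_cons_cons, hx, Option.getD_some]
          split_ifs <;> simp
      rw [hpad]
      have hc1 : ((i : Int) + 1) = ((i + 1 : Nat) : Int) := by push_cast; ring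
      simp only [pvBJoin, hc1, PySem.List.slice_natCast, ← hcur']
      simp [hcur]
    · simp only [if_neg hge]
      rw [ih (i + 1) j (run + PySem.Str.len w + 1) chunks (cur ++ [w]) hws'
            (by omega) (by omega) hcur']
      have hc1 : ((i : Int) + 1) = ((i + 1 : Nat) : Int) := by push_cast; ring
      rw [hc1]

-- ===== VERDICT (by name: the statement is the Claim_ definition above) =====
theorem crear_chunks_spec : Claim_equal_crear_chunks := by
  intro texto mt _
  unfold Spec_crear_chunks crear_chunks crear_chunks_alt
  have h := pvMain mt (PySem.Str.split₀ texto) (PySem.Str.split₀ texto) 0 0 0 [] []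
    (by simp) (le_refl _) (Nat.zero_le _) (by simp)
  simp only [Nat.cast_zero, List.nil_append] at h
  rw [h]
  congr 1
  unfold pvPad
  cases pvBCuts mt (PySem.Str.split₀ texto) 0 0 with
  | nil => simp
  | cons c cs =>
    obtain ⟨x, hx⟩ := Option.isSome_iff_exists.mp
      (List.getLast?_isSome.mpr (List.cons_ne_nil c cs))
    simp only [hx, Option.getD_some]
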